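-- pv_equiv track=rewrite | github.com/hanukathas/CodingRevisions | arrays/max_erasure_val.py | max_erasure_val_r
-- ===== SOURCE A (Python) =====
-- def max_erasure_val_r(nums: list) -> int:
--     seen = set()
--     running_sum = 0
--     max_sum = 0
--     for i in range(len(nums)):
--         if nums[i] in seen:
--             seen.remove(nums[i])
--             running_sum -= nums[i]
--         seen.add(nums[i])
--         running_sum += nums[i]
--         max_sum = max(max_sum, running_sum)
--     return max_sum
-- ===== SOURCE B (Python) =====
-- from itertools import accumulate
--
--
-- def max_erasure_val_r(nums: list) -> int:
--     # Pass 1: each value contributes only on its first occurrence.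
--     seen = set()
--     contribs = []
--     for x in nums:
--         if x in seen:
--             contribs.append(0)
--         else:
--             seen.add(x)
--             contribs.append(x)
--     # Pass 2: best prefix sum, never below 0.
--     return max([0] + list(accumulate(contribs)))
-- ===== Notes on version B (the rewrite author's own statement) =====
-- stated objective: alternative
-- what changed: Replaces A's single inline loop (set toggling with remove/re-add, running sum and max updated together) by two passes: build a first-occurrence contribution list, then take the max of 0 and its prefix sums via itertools.accumulate.
import Mathlib
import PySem

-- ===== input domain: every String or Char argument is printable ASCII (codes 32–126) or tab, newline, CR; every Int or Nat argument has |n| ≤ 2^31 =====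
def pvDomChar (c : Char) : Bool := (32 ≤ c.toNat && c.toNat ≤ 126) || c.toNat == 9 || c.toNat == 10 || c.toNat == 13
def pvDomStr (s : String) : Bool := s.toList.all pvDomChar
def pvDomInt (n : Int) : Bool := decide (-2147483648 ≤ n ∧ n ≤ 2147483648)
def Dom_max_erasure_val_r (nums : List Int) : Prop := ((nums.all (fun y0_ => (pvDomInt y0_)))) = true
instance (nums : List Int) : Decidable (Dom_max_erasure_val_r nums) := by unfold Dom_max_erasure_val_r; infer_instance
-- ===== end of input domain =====

-- B replaces A's single toggling-set loop by a first-occurrence contribution pass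
-- followed by prefix sums and a max with seed 0 (objective: alternative decomposition, same cost).

-- ===== PORT A =====
-- loop body of A; state = (seen, running_sum, max_sum)
def stepA (st : PySem.Set Int × Int × Int) (x : Int) : PySem.Set Int × Int × Int :=
  let seen := st.1
  let rs := st.2.1
  let ms := st.2.2
  -- 'if nums[i] in seen: seen.remove(nums[i]); running_sum -= nums[i]'
  -- (seen.remove: x ∈ seen in this branch, so discard is exact)
  let p := if PySem.Set.contains seen x then (PySem.Set.discard seen x, rs - x) else (seen, rs)
  let seen2 := PySem.Set.add p.1 x
  let rs2 := p.2 + x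
  (seen2, rs2, max ms rs2)

def max_erasure_val_r (nums : List Int) : Int :=
  -- 'for i in range(len(nums)): … nums[i] …' ; i is always in range, so pyGetD is exact
  ((PySem.List.pyRange 0 (PySem.List.len nums) 1).foldl
      (fun st i => stepA st (PySem.List.pyGetD nums i 0))
      (PySem.Set.empty, 0, 0)).2.2

-- ===== PORT B =====
-- pass 1 of Source B: each value contributes only on its first occurrence
def contribsB (seen : PySem.Set Int) : List Int → List Int
  | [] => []
  | x :: xs =>
      if PySem.Set.contains seen x then 0 :: contribsB seen xs
      else x :: contribsB (PySem.Set.add seen x) xs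

-- itertools.accumulate, starting offset s (s = 0 at the call)
def accumB (s : Int) : List Int → List Int
  | [] => []
  | c :: cs => (s + c) :: accumB (s + c) cs

def max_erasure_val_r_alt (nums : List Int) : Int :=
  let contribs := contribsB PySem.Set.empty nums
  -- 'max([0] + list(accumulate(contribs)))' : builtin max with 0 seeded in front
  (accumB 0 contribs).foldl max 0

-- ===== PRECONDITION & SPEC =====
def Spec_max_erasure_val_r (nums : List Int) (out : Int) : Prop := out = max_erasure_val_r_alt nums
instance (nums : List Int) (out : Int) : Decidable (Spec_max_erasure_val_r nums out) := by unfold Spec_max_erasure_val_r; infer_instance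

-- ===== CLAIM (what is proved, stated in full; the proofs are below) =====
def Claim_equal_max_erasure_val_r : Prop := ∀ (nums : List Int), Dom_max_erasure_val_r nums → Spec_max_erasure_val_r nums (max_erasure_val_r nums)

-- ===== LEMMAS AND PROOFS =====

-- contribsB only looks at membership, so membership-equal seen-sets give the same list
lemma contribsB_congr (xs : List Int) : ∀ (s t : PySem.Set Int),
    (∀ y, (y ∈ s ↔ y ∈ t)) → contribsB s xs = contribsB t xs := by
  induction xs with
  | nil => intro s t h; rfl
  | cons x xs ih =>
    intro s t h
    have hc : PySem.Set.contains s x = PySem.Set.contains t x := by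
      rcases Bool.eq_false_or_eq_true (PySem.Set.contains s x) with hs | hs <;>
        rcases Bool.eq_false_or_eq_true (PySem.Set.contains t x) with ht | ht <;>
        simp_all [h x]
    simp only [contribsB, hc]
    by_cases hmem : x ∈ t
    · simp [hmem, ih s t h]
    · have hcf : PySem.Set.contains t x = false := by
        simpa [PySem.Set.contains_iff] using hmem
      rw [hcf]
      simp only [Bool.false_eq_true, if_false]
      exact congrArg (x :: ·) (ih _ _ (fun y => by simp [PySem.Set.mem_add, h y]))

-- after remove-then-add of an element already present, membership is unchanged
lemma mem_add_discard_self (s : PySem.Set Int) (x : Int) (hx : x ∈ s) (y : Int) :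
    y ∈ PySem.Set.add (PySem.Set.discard s x) x ↔ y ∈ s := by
  simp only [PySem.Set.mem_add, PySem.Set.mem_discard]
  by_cases hyx : y = x
  · subst hyx; tauto
  · tauto

-- core invariant: A's loop result = max over ms and the offset prefix sums of B's contributions
lemma loop_eq (xs : List Int) : ∀ (seen : PySem.Set Int) (rs ms : Int),
    (xs.foldl stepA (seen, rs, ms)).2.2 = (accumB rs (contribsB seen xs)).foldl max ms := by
  induction xs with
  | nil => intro seen rs ms; rfl
  | cons x xs ih =>
    intro seen rs ms
    by_cases hx : x ∈ seen
    · have hsimp : stepA (seen, rs, ms) x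
          = (PySem.Set.add (PySem.Set.discard seen x) x, rs, max ms rs) := by
        simp only [stepA]
        rw [if_pos (by simpa [PySem.Set.contains_iff] using hx)]
        refine Prod.ext rfl (Prod.ext ?_ ?_) <;> simp
      rw [List.foldl_cons, hsimp, ih]
      have hcongr : contribsB (PySem.Set.add (PySem.Set.discard seen x) x) xs
          = contribsB seen xs :=
        contribsB_congr xs _ _ (fun y => mem_add_discard_self seen x hx y)
      rw [hcongr]
      have hC : contribsB seen (x :: xs) = 0 :: contribsB seen xs := by
        simp [contribsB, hx]
      simp [hC, accumB]
    · have hsimp : stepA (seen, rs, ms) x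
          = (PySem.Set.add seen x, rs + x, max ms (rs + x)) := by
        simp only [stepA]
        rw [if_neg (by simpa [PySem.Set.contains_iff] using hx)]
      rw [List.foldl_cons, hsimp, ih]
      have hC : contribsB seen (x :: xs) = x :: contribsB (PySem.Set.add seen x) xs := by
        simp [contribsB, hx]
      simp [hC, accumB]

-- ===== VERDICT (by name: the statement is the Claim_ definition above) =====
theorem max_erasure_val_r_spec : Claim_equal_max_erasure_val_r := by
  intro nums _
  unfold Spec_max_erasure_val_r max_erasure_val_r max_erasure_val_r_alt
  rw [PySem.List.foldl_pyRange_zero_pyGetD nums 0 stepA (PySem.Set.empty, 0, 0)]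
  exact loop_eq nums PySem.Set.empty 0 0
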